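-- pv_equiv track=rewrite | github.com/pypi-data/pypi-mirror-399 | packages/ewokscore/ewokscore-4.0.0-py3-none-any.whl/ewokscore/graph/inputs.py | _shorten_task_identifiers
-- ===== SOURCE A (Python) =====
-- from typing import Dict
-- from typing import Sequence
--
-- def _shorten_task_identifiers(task_identifiers: Sequence[str]) -> Dict[str, str]:
--     """
--     Return a mapping from full task identifiers to the shortest unique suffixes.
--     """
--     task_identifiers = set(task_identifiers)
--     nunique = len(task_identifiers)
--
--     all_reversed_parts = {
--         tid: tuple(reversed(tid.split("."))) for tid in task_identifiers
--     }
--     reversed_parts = {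
--         tid: (tid_parts[0],) for tid, tid_parts in all_reversed_parts.items()
--     }
--
--     while True:
--         all_parts = list(reversed_parts.values())
--         nunique_current = len(set(all_parts))
--         if nunique_current == nunique:
--             break
--         for tid, tid_parts in list(reversed_parts.items()):
--             if all_parts.count(tid_parts) == 1:
--                 continue
--             i = len(tid_parts)
--             full_tid_parts = all_reversed_parts[tid]
--             if i < len(full_tid_parts):
--                 reversed_parts[tid] = reversed_parts[tid] + (full_tid_parts[i],)
--
--     return {pid: ".".join(reversed(parts)) for pid, parts in reversed_parts.items()}
-- ===== SOURCE B (Python) =====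
-- from typing import Dict
-- from typing import Sequence
--
--
-- def _shorten_task_identifiers(task_identifiers: Sequence[str]) -> Dict[str, str]:
--     """
--     Return a mapping from full task identifiers to the shortest unique suffixes.
--     """
--     tids = set(task_identifiers)
--     parts = {tid: tid.split(".")[::-1] for tid in tids}
--
--     # One pass: count every reversed-suffix prefix of every identifier.
--     counts = {}
--     for p in parts.values():
--         for k in range(1, len(p) + 1):
--             key = tuple(p[:k])
--             counts[key] = counts.get(key, 0) + 1
--
--     # Per identifier, pick the smallest suffix length that is globally unique
--     # (falling back to the full identifier when none is).
--     shortened = {}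
--     for tid, p in parts.items():
--         n = len(p)
--         k = next((k for k in range(1, n + 1) if counts[tuple(p[:k])] == 1), n)
--         shortened[tid] = ".".join(reversed(p[:k]))
--     return shortened
-- ===== Notes on version B (the rewrite author's own statement) =====
-- stated objective: alternative
-- what changed: Replaces the extend-until-stable fixpoint loop (which re-counts every current tuple against all others each round) with a single precomputed suffix-count table over all reversed-prefix lengths, then one direct minimal-unique-length selection per identifier.
import Mathlib
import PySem

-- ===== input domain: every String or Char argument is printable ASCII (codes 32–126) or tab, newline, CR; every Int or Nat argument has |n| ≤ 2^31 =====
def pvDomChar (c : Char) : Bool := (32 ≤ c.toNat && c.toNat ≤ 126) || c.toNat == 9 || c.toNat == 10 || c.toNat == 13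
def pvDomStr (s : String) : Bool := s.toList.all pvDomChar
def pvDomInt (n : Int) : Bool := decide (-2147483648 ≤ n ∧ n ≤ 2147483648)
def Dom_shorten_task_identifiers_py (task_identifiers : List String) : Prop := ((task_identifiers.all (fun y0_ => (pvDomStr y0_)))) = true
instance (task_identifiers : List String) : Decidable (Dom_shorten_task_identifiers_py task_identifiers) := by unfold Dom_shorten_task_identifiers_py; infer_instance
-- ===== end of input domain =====

-- B replaces A's extend-until-stable fixpoint (re-counting every tuple against all others each
-- round) with one precomputed suffix-count table and a direct minimal-unique-length pick per id.
-- Output is a dict (association list); as in Python, its entry order is the set/dict iteration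
-- order and outputs are compared as dicts (ignoring order).

-- ===== PORT A =====
-- one round of A's `for tid, tid_parts in list(reversed_parts.items())` body
def pvStepA (allp : PySem.Dict String (List String)) (state : List (String × List String)) : List (String × List String) :=
  let all_parts := state.map (·.2)
  state.map (fun p =>
    if PySem.List.count all_parts p.2 == 1 then p
    else
      let i := p.2.length
      let full := allp.getD p.1 []      -- key always present (keys = the tids)
      if i < full.length then (p.1, p.2 ++ [PySem.List.pyGetD full (i : Int) ""]) else p)

-- A's `while True` loop; fuel only makes it total (proved sufficient: each non-break round
-- strictly grows some tuple, bounded by the total number of parts)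
def pvLoopA (allp : PySem.Dict String (List String)) (nunique : Int) :
    Nat → List (String × List String) → List (String × List String)
  | 0, state => state
  | fuel+1, state =>
    if PySem.Set.len (PySem.Set.ofList (state.map (·.2))) == nunique then state
    else pvLoopA allp nunique fuel (pvStepA allp state)

def shorten_task_identifiers_py (task_identifiers : List String) : List (String × String) :=
  let tids : PySem.Set String := PySem.Set.ofList task_identifiers
  let nunique := PySem.Set.len tids
  let all_reversed_parts : PySem.Dict String (List String) :=
    tids.foldl (fun d t => d.insert t ((PySem.Str.split? t ".").getD []).reverse) PySem.Dict.empty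
  let reversed_parts : List (String × List String) :=
    all_reversed_parts.items.map (fun p => (p.1, [PySem.List.pyGetD p.2 (0 : Int) ""]))
  let final := pvLoopA all_reversed_parts nunique
      ((all_reversed_parts.items.map (fun p => p.2.length)).sum + 1) reversed_parts
  (final.foldl (fun d p => d.insert p.1 (PySem.Str.join "." p.2.reverse)) PySem.Dict.empty).items

-- ===== PORT B =====
def shorten_task_identifiers_py_alt (task_identifiers : List String) : List (String × String) :=
  let tids : PySem.Set String := PySem.Set.ofList task_identifiers
  let parts : PySem.Dict String (List String) :=
    tids.foldl (fun d t => d.insert t ((PySem.Str.split? t ".").getD []).reverse) PySem.Dict.empty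
  let counts : PySem.Dict (List String) Int :=
    parts.values.foldl (fun d p =>
      (PySem.List.pyRange 1 ((p.length : Int) + 1) 1).foldl
        (fun d k => d.insert (PySem.List.slice p none (some k))
                      (d.getD (PySem.List.slice p none (some k)) 0 + 1)) d)
      PySem.Dict.empty
  (parts.items.foldl (fun d q =>
      let n : Int := q.2.length
      let k : Int := ((PySem.List.pyRange 1 (n + 1) 1).find?
          (fun k => counts.getD (PySem.List.slice q.2 none (some k)) 0 == 1)).getD n
      d.insert q.1 (PySem.Str.join "." (PySem.List.slice q.2 none (some k)).reverse))
    PySem.Dict.empty).items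

-- ===== PRECONDITION & SPEC =====
def Spec_shorten_task_identifiers_py (task_identifiers : List String) (out : List (String × String)) : Prop := out = shorten_task_identifiers_py_alt task_identifiers
instance (task_identifiers : List String) (out : List (String × String)) : Decidable (Spec_shorten_task_identifiers_py task_identifiers out) := by unfold Spec_shorten_task_identifiers_py; infer_instance

-- ===== CLAIM (what is proved, stated in full; the proofs are below) =====
def Claim_equal_shorten_task_identifiers_py : Prop := ∀ (task_identifiers : List String), Dom_shorten_task_identifiers_py task_identifiers → Spec_shorten_task_identifiers_py task_identifiers (shorten_task_identifiers_py task_identifiers)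

-- ===== LEMMAS AND PROOFS =====

theorem pvJoin_append_singleton (sep y : List Char) (xs : List (List Char)) :
    PySem.Chars.join sep (xs ++ [y]) = PySem.Chars.join sep xs ++ (if xs = [] then [] else sep) ++ y := by
  induction xs with
  | nil => simp [PySem.Chars.join_nil, PySem.Chars.join_singleton]
  | cons x xs ih =>
    cases xs with
    | nil => simp [PySem.Chars.join_cons_cons, PySem.Chars.join_singleton, PySem.Chars.join_nil]
    | cons x' xs' =>
      simp only [List.cons_append, PySem.Chars.join_cons_cons]
      rw [show x' :: (xs' ++ [y]) = (x' :: xs') ++ [y] from rfl, ih]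
      simp [List.append_assoc]

theorem pvGo_join (fuel : Nat) : ∀ (l cur : List Char) (acc : List (List Char)), l.length ≤ fuel →
    PySem.Chars.join ['.'] (PySem.Chars.splitOn.go ['.'] fuel l cur acc) =
      PySem.Chars.join ['.'] acc.reverse ++ (if acc = [] then [] else ['.']) ++ cur.reverse ++ l := by
  induction fuel with
  | zero =>
    intro l cur acc h
    have hl : l = [] := List.eq_nil_of_length_eq_zero (Nat.le_zero.mp h)
    subst hl
    rw [PySem.Chars.splitOn.go]
    rw [List.reverse_cons, pvJoin_append_singleton]
    simp
  | succ n ih =>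
    intro l cur acc h
    cases l with
    | nil =>
      rw [PySem.Chars.splitOn.go]
      · rw [List.reverse_cons, pvJoin_append_singleton]
        simp
      · intro h2; exact absurd h2 (by omega)
    | cons c rest =>
      rw [PySem.Chars.splitOn.go]
      by_cases hc : c = '.'
      · subst hc
        have hpre : (['.'] : List Char).isPrefixOf ('.' :: rest) = true := by simp [List.isPrefixOf]
        rw [hpre]
        simp only [if_true]
        rw [ih _ _ _ (by simpa using Nat.le_of_succ_le_succ h)]
        rw [List.reverse_cons, pvJoin_append_singleton]
        simp [List.append_assoc]
      · have hpre : (['.'] : List Char).isPrefixOf (c :: rest) = false := by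
          simp [List.isPrefixOf]
          exact fun h => hc h.symm
        rw [hpre]
        simp only [Bool.false_eq_true, if_false]
        rw [ih _ _ _ (by simpa using Nat.le_of_succ_le_succ h)]
        simp [List.append_assoc]

theorem pvJoin_splitOn (s : List Char) : PySem.Chars.join ['.'] (PySem.Chars.splitOn s ['.']) = s := by
  unfold PySem.Chars.splitOn
  rw [pvGo_join _ _ _ _ (Nat.le_succ _)]
  simp [PySem.Chars.join_nil]

theorem pvGo_length (fuel : Nat) : ∀ (l cur : List Char) (acc : List (List Char)),
    acc.length < (PySem.Chars.splitOn.go ['.'] fuel l cur acc).length := by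
  induction fuel with
  | zero => intro l cur acc; rw [PySem.Chars.splitOn.go]; simp
  | succ n ih =>
    intro l cur acc
    cases l with
    | nil =>
      rw [PySem.Chars.splitOn.go]
      · simp
      · intro h2; exact absurd h2 (by omega)
    | cons c rest =>
      rw [PySem.Chars.splitOn.go]
      by_cases hc : (['.'] : List Char).isPrefixOf (c :: rest) = true
      · rw [hc]; simp only [if_true]
        have := ih (List.drop 1 (c :: rest)) [] ((cur.reverse) :: acc)
        simp at this ⊢
        omega
      · simp only [Bool.not_eq_true] at hc
        rw [hc]
        simp only [Bool.false_eq_true, if_false]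
        exact ih rest (c :: cur) acc

def pvP (t : String) : List String := ((PySem.Str.split? t ".").getD []).reverse

theorem pvSplit_eq (t : String) :
    (PySem.Str.split? t ".").getD [] = (PySem.Chars.splitOn t.toList ['.']).map String.ofList := by
  simp [PySem.Str.split?, PySem.Chars.split?]

theorem pvP_ne_nil (t : String) : pvP t ≠ [] := by
  unfold pvP
  rw [pvSplit_eq]
  simp only [ne_eq, List.reverse_eq_nil_iff, List.map_eq_nil_iff]
  intro h
  have := pvGo_length (t.toList.length + 1) t.toList [] []
  unfold PySem.Chars.splitOn at h
  rw [h] at this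
  simp at this

theorem pvP_inj {t t' : String} (h : pvP t = pvP t') : t = t' := by
  unfold pvP at h
  rw [pvSplit_eq, pvSplit_eq] at h
  have h2 := List.reverse_injective h
  have h3 : (PySem.Chars.splitOn t.toList ['.']).map (String.toList ∘ String.ofList)
      = (PySem.Chars.splitOn t'.toList ['.']).map (String.toList ∘ String.ofList) := by
    rw [← List.map_map, ← List.map_map, h2]
  simp only [Function.comp_def, String.toList_ofList, List.map_id'] at h3
  have h4 := congrArg (PySem.Chars.join ['.']) h3
  rw [pvJoin_splitOn, pvJoin_splitOn] at h4
  exact String.toList_inj.mp h4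

def pvCnt (ts : List String) (p : List String) : Nat := ts.countP (fun t' => (pvP t').take p.length == p)
def pvK (ts : List String) (t : String) : Nat :=
  (((List.range (pvP t).length).find? (fun j => pvCnt ts ((pvP t).take (j+1)) == 1)).map (· + 1)).getD (pvP t).length
def pvV (ts : List String) (r : Nat) (t : String) : List String := (pvP t).take (min (r+1) (pvK ts t))

theorem pvTwo_le_length {α : Type} {x y : α} {xs : List α} (hx : x ∈ xs) (hy : y ∈ xs) (hxy : x ≠ y) :
    2 ≤ xs.length := by
  obtain ⟨s, u, rfl⟩ := List.append_of_mem hx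
  rcases List.mem_append.mp hy with h | h
  · have := List.length_pos_of_mem h
    simp [List.length_append]
    omega
  · rcases List.mem_cons.mp h with h | h
    · exact absurd h.symm hxy
    · have := List.length_pos_of_mem h
      simp [List.length_append]
      omega

theorem pvCountP_two {p : String → Bool} {ts : List String} {t t' : String}
    (ht : t ∈ ts) (ht' : t' ∈ ts) (hne : t' ≠ t) (hpt : p t = true) (hpt' : p t' = true) :
    2 ≤ ts.countP p := by
  rw [List.countP_eq_length_filter]
  exact pvTwo_le_length (List.mem_filter.mpr ⟨ht, hpt⟩) (List.mem_filter.mpr ⟨ht', hpt'⟩) (Ne.symm hne)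

theorem pvCountP_exists_other {p : String → Bool} {ts : List String} {t : String}
    (hnd : ts.Nodup) (ht : t ∈ ts) (hpt : p t = true) (h : ts.countP p ≠ 1) :
    ∃ t' ∈ ts, t' ≠ t ∧ p t' = true := by
  by_contra hno
  push_neg at hno
  have hle : ts.countP p ≤ List.count t ts := by
    apply List.countP_mono_left
    intro x hx hpx
    have : x = t := by
      by_cases hxt : x = t
      · exact hxt
      · exact absurd hpx (by simpa using hno x hx hxt)
    simp [this]
  have h1 : 0 < ts.countP p := List.countP_pos_iff.mpr ⟨t, ht, hpt⟩
  have h2 := (List.nodup_iff_count_le_one.mp hnd) t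
  omega

theorem pvCnt_take {ts : List String} {t : String} {k : Nat} (hk : k ≤ (pvP t).length) :
    pvCnt ts ((pvP t).take k) = ts.countP (fun t' => (pvP t').take k == (pvP t).take k) := by
  unfold pvCnt
  congr 1
  funext t'
  rw [List.length_take, min_eq_left hk]

theorem pvK_pos (ts : List String) (t : String) : 1 ≤ pvK ts t := by
  unfold pvK
  cases h : (List.range (pvP t).length).find? (fun j => pvCnt ts ((pvP t).take (j+1)) == 1) with
  | none =>
    simp only [h, Option.map_none, Option.getD_none]
    have := pvP_ne_nil t
    have : 0 < (pvP t).length := List.length_pos_of_ne_nil this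
    omega
  | some j => simp [h]

theorem pvK_le (ts : List String) (t : String) : pvK ts t ≤ (pvP t).length := by
  unfold pvK
  cases h : (List.range (pvP t).length).find? (fun j => pvCnt ts ((pvP t).take (j+1)) == 1) with
  | none => simp [h]
  | some j =>
    have := List.mem_of_find?_eq_some h
    simp only [List.mem_range] at this
    simp [h]
    omega

theorem pvRange_find?_min {p : Nat → Bool} : ∀ {n j : Nat}, (List.range n).find? p = some j →
    ∀ i, i < j → p i = false := by
  intro n
  induction n with
  | zero => intro j h; simp at h
  | succ m ih =>
    intro j h i hij
    rw [List.range_succ, List.find?_append] at h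
    cases hf : (List.range m).find? p with
    | some j' =>
      rw [hf] at h
      simp only [Option.some_or] at h
      exact ih (hf.trans (by rw [h])) i hij
    | none =>
      rw [hf] at h
      simp only [Option.none_or] at h
      have hall := List.find?_eq_none.mp hf
      by_cases hpn : p m = true
      · rw [List.find?_cons_of_pos hpn] at h
        have hjn : j = m := (Option.some.inj h).symm
        subst hjn
        by_cases hin : i < j
        · simpa using hall i (List.mem_range.mpr hin)
        · omega
      · rw [List.find?_cons_of_neg hpn] at h
        simp at h

theorem pvK_lt_cnt {ts : List String} {t : String} {k : Nat} (hk1 : 1 ≤ k) (hk : k < pvK ts t) :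
    pvCnt ts ((pvP t).take k) ≠ 1 := by
  unfold pvK at hk
  cases h : (List.range (pvP t).length).find? (fun j => pvCnt ts ((pvP t).take (j+1)) == 1) with
  | some j =>
    rw [h] at hk
    simp only [Option.map_some, Option.getD_some] at hk
    have := pvRange_find?_min h (k-1) (by omega)
    have hk' : k - 1 + 1 = k := by omega
    rw [hk'] at this
    simpa using this
  | none =>
    rw [h] at hk
    simp only [Option.map_none, Option.getD_none] at hk
    have hall := List.find?_eq_none.mp h
    have := hall (k-1) (List.mem_range.mpr (by omega))
    have hk' : k - 1 + 1 = k := by omega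
    rw [hk'] at this
    simpa using this

theorem pvK_cases (ts : List String) (t : String) :
    pvCnt ts ((pvP t).take (pvK ts t)) = 1 ∨ pvK ts t = (pvP t).length := by
  unfold pvK
  cases h : (List.range (pvP t).length).find? (fun j => pvCnt ts ((pvP t).take (j+1)) == 1) with
  | some j =>
    left
    have := List.find?_some h
    simp only [Option.map_some, Option.getD_some]
    simpa using this
  | none => right; simp

theorem pvK_ge {ts : List String} {t' : String} {m : Nat} (hlen : m ≤ (pvP t').length)
    (hall : ∀ k, 1 ≤ k → k ≤ m → pvCnt ts ((pvP t').take k) ≠ 1) : m ≤ pvK ts t' := by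
  unfold pvK
  cases h : (List.range (pvP t').length).find? (fun j => pvCnt ts ((pvP t').take (j+1)) == 1) with
  | none => simpa using hlen
  | some j =>
    simp only [Option.map_some, Option.getD_some]
    by_contra hlt
    have hpj := List.find?_some h
    simp only [beq_iff_eq] at hpj
    exact hall (j+1) (by omega) (by omega) hpj

theorem pvV_len (ts : List String) (r : Nat) (t : String) :
    (pvV ts r t).length = min (r+1) (pvK ts t) := by
  unfold pvV
  rw [List.length_take]
  have := pvK_le ts t
  omega

theorem pvCount_map_eq (ts : List String) (r : Nat) (t : String) :
    List.count (pvV ts r t) (ts.map (pvV ts r)) = ts.countP (fun t' => pvV ts r t' == pvV ts r t) := by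
  rw [List.count_eq_countP, List.countP_map]
  rfl

theorem pvV_eq_take {ts : List String} {r : Nat} {t : String} (hs : pvK ts t ≤ r+1) :
    pvV ts r t = (pvP t).take (pvK ts t) := by
  unfold pvV
  rw [min_eq_right hs]

theorem pvCollide_settled {ts : List String} {t : String} {r : Nat} (hnd : ts.Nodup) (ht : t ∈ ts)
    (hs : pvK ts t ≤ r+1) (hc : List.count (pvV ts r t) (ts.map (pvV ts r)) ≠ 1) :
    pvK ts t = (pvP t).length := by
  rw [pvCount_map_eq] at hc
  obtain ⟨t', ht', hne, hpt'⟩ := pvCountP_exists_other hnd ht (by simp) hc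
  have hveq : pvV ts r t' = pvV ts r t := by simpa using hpt'
  have hkle := pvK_le ts t
  have hkle' := pvK_le ts t'
  have hlen : min (r+1) (pvK ts t') = pvK ts t := by
    have := congrArg List.length hveq
    rw [pvV_len, pvV_len, min_eq_right hs] at this
    exact this
  have htake' : (pvP t').take (pvK ts t) = (pvP t).take (pvK ts t) := by
    have : pvV ts r t' = (pvP t').take (pvK ts t) := by
      unfold pvV; rw [hlen]
    rw [← this, hveq, pvV_eq_take hs]
  rcases pvK_cases ts t with hone | hfull
  · -- the k-prefix of t is globally unique: impossible with the second witness t'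
    exfalso
    rw [pvCnt_take hkle] at hone
    have h2 := pvCountP_two (p := fun t'' => (pvP t'').take (pvK ts t) == (pvP t).take (pvK ts t))
      ht ht' hne (by simp) (by simpa using htake')
    omega
  · exact hfull

theorem pvCollide_unsettled {ts : List String} {t : String} {r : Nat} (hnd : ts.Nodup) (ht : t ∈ ts)
    (hu : r+1 < pvK ts t) : 2 ≤ List.count (pvV ts r t) (ts.map (pvV ts r)) := by
  have hkle := pvK_le ts t
  have hrn : r+1 ≤ (pvP t).length := by omega
  have hcnt := pvK_lt_cnt (ts := ts) (t := t) (k := r+1) (by omega) hu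
  rw [pvCnt_take hrn] at hcnt
  obtain ⟨t', ht', hne, hpt'⟩ := pvCountP_exists_other hnd ht (by simp) hcnt
  have htake' : (pvP t').take (r+1) = (pvP t).take (r+1) := by simpa using hpt'
  have hlen' : r+1 ≤ (pvP t').length := by
    have := congrArg List.length htake'
    rw [List.length_take, List.length_take] at this
    omega
  have hK' : r+1 ≤ pvK ts t' := by
    apply pvK_ge hlen'
    intro k hk1 hkm
    have heq : (pvP t').take k = (pvP t).take k := by
      have h1 : (pvP t').take k = ((pvP t').take (r+1)).take k := by
        rw [List.take_take, min_eq_left hkm]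
      rw [h1, htake', List.take_take, min_eq_left hkm]
    rw [heq]
    exact pvK_lt_cnt hk1 (by omega)
  have hveq : pvV ts r t' = pvV ts r t := by
    unfold pvV
    rw [min_eq_left hK', min_eq_left (le_of_lt hu), htake']
  rw [pvCount_map_eq]
  exact pvCountP_two ht ht' hne (by simp) (by simpa using hveq)

theorem pvSettled_nodup {ts : List String} {r : Nat} (hnd : ts.Nodup)
    (hall : ∀ t ∈ ts, pvK ts t ≤ r+1) : (ts.map (pvV ts r)).Nodup := by
  apply List.Nodup.map_on _ hnd
  intro x hx y hy hveq
  have hsx := hall x hx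
  have hsy := hall y hy
  have hkx := pvK_le ts x
  have hky := pvK_le ts y
  rw [pvV_eq_take hsx, pvV_eq_take hsy] at hveq
  have hklen : pvK ts x = pvK ts y := by
    have := congrArg List.length hveq
    rw [List.length_take, List.length_take] at this
    omega
  by_contra hne
  rcases pvK_cases ts x with hone | hfullx
  · rw [pvCnt_take hkx] at hone
    have h2 := pvCountP_two (p := fun t'' => (pvP t'').take (pvK ts x) == (pvP x).take (pvK ts x))
      hx hy (Ne.symm hne) (by simp)
      (by
        have hv2 := hveq
        rw [hklen] at hv2
        simp only [beq_iff_eq]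
        rw [hklen]
        exact hv2.symm)
    omega
  · rcases pvK_cases ts y with hone | hfully
    · rw [pvCnt_take hky] at hone
      have h2 := pvCountP_two (p := fun t'' => (pvP t'').take (pvK ts y) == (pvP y).take (pvK ts y))
        hy hx hne (by simp)
        (by
          have hv2 := hveq
          rw [hklen] at hv2
          simp only [beq_iff_eq]
          exact hv2)
      omega
    · apply hne
      apply pvP_inj
      have hx2 : (pvP x).take (pvK ts x) = pvP x := by rw [hfullx]; exact List.take_length
      have hy2 : (pvP y).take (pvK ts y) = pvP y := by rw [hfully]; exact List.take_length
      calc pvP x = (pvP x).take (pvK ts x) := hx2.symm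
        _ = (pvP y).take (pvK ts y) := hveq
        _ = pvP y := hy2

def pvS (ts : List String) (r : Nat) : List (String × List String) := ts.map (fun t => (t, pvV ts r t))

theorem pvS_snd (ts : List String) (r : Nat) : (pvS ts r).map (·.2) = ts.map (pvV ts r) := by
  unfold pvS
  rw [List.map_map]
  rfl

theorem pvStep_eq {ts : List String} {allp : PySem.Dict String (List String)} {r : Nat}
    (hnd : ts.Nodup) (hD : ∀ t ∈ ts, allp.getD t [] = pvP t) :
    pvStepA allp (pvS ts r) = pvS ts (r+1) := by
  unfold pvStepA
  simp only [pvS_snd]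
  show (pvS ts r).map _ = pvS ts (r+1)
  unfold pvS
  rw [List.map_map]
  apply List.map_congr_left
  intro t ht
  simp only [Function.comp_apply]
  rw [PySem.List.count_eq]
  have hkle := pvK_le ts t
  have hkpos := pvK_pos ts t
  by_cases hs : pvK ts t ≤ r + 1
  · -- settled: the entry no longer changes
    have hv2 : pvV ts (r+1) t = pvV ts r t := by
      rw [pvV_eq_take hs, pvV_eq_take (by omega)]
    by_cases hc : List.count (pvV ts r t) (ts.map (pvV ts r)) = 1
    · simp only [hc]
      simp [hv2]
    · have hfull := pvCollide_settled hnd ht hs hc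
      have hb : (List.count (pvV ts r t) (ts.map (pvV ts r)) == 1) = false := by
        simpa using hc
      simp only [hb, Bool.false_eq_true, if_false]
      rw [hD t ht]
      have hlen : (pvV ts r t).length = (pvP t).length := by
        rw [pvV_len, min_eq_right hs, hfull]
      rw [hlen]
      simp [hv2]
  · -- still ambiguous: the entry extends by one part
    push_neg at hs
    have hc2 := pvCollide_unsettled hnd ht hs
    have hb : (List.count (pvV ts r t) (ts.map (pvV ts r)) == 1) = false := by
      simp only [beq_eq_false_iff_ne, ne_eq]
      omega
    simp only [hb, Bool.false_eq_true, if_false]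
    rw [hD t ht]
    have hlen : (pvV ts r t).length = r + 1 := by
      rw [pvV_len, min_eq_left (by omega)]
    rw [hlen]
    have hlt : r + 1 < (pvP t).length := by omega
    simp only [hlt, if_true]
    have hget : PySem.List.pyGetD (pvP t) ((r+1 : Nat) : Int) "" = (pvP t)[r+1] := by
      rw [PySem.List.pyGetD_natCast]
      exact List.getD_eq_getElem _ _ hlt
    rw [hget]
    have hv1 : pvV ts r t = (pvP t).take (r+1) := by unfold pvV; rw [min_eq_left (by omega)]
    have hv2 : pvV ts (r+1) t = (pvP t).take (r+1+1) := by unfold pvV; rw [min_eq_left (by omega)]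
    rw [hv1, hv2, List.take_succ (l := pvP t) (i := r+1)]
    simp [List.getElem?_eq_getElem hlt]

theorem pvFoldl_add_sublist {α : Type} [BEq α] : ∀ (xs : List α) (s : List α),
    (xs.foldl PySem.Set.add s).Sublist (s ++ xs) := by
  intro xs
  induction xs with
  | nil => intro s; simp
  | cons x xs ih =>
    intro s
    simp only [List.foldl_cons]
    apply List.Sublist.trans (ih (PySem.Set.add s x))
    unfold PySem.Set.add
    by_cases hc : PySem.Set.contains s x = true
    · rw [if_pos hc]
      apply List.Sublist.append_left
      exact List.sublist_cons_self x xs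
    · rw [if_neg hc]
      rw [List.append_assoc]
      apply List.Sublist.append_left
      simp

theorem pvOfList_sublist {α : Type} [BEq α] (xs : List α) : (PySem.Set.ofList xs).Sublist xs := by
  rw [PySem.Set.ofList_eq_foldl]
  simpa using pvFoldl_add_sublist xs []

theorem pvNodup_ofList_eq {α : Type} [BEq α] [LawfulBEq α] {xs : List α} (h : xs.Nodup) :
    PySem.Set.ofList xs = xs := by
  rw [← PySem.Set.update_empty]
  have := PySem.Set.update_eq_append_of_disjoint PySem.Set.empty xs h (by intro x hx; simp [PySem.Set.empty])
  simpa [PySem.Set.empty] using this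

theorem pvBreak_iff {ts : List String} {r : Nat} (hnd : ts.Nodup) :
    (PySem.Set.len (PySem.Set.ofList (ts.map (pvV ts r))) == (ts.length : Int)) =
      decide (∀ t ∈ ts, pvK ts t ≤ r+1) := by
  by_cases hall : ∀ t ∈ ts, pvK ts t ≤ r+1
  · have hnd2 := pvSettled_nodup hnd hall
    rw [pvNodup_ofList_eq hnd2]
    simp only [PySem.Set.len, List.length_map, beq_self_eq_true]
    exact (decide_eq_true hall).symm
  · simp only [hall, decide_false]
    rw [beq_eq_false_iff_ne]
    intro habs
    apply hall
    have hlen : (PySem.Set.ofList (ts.map (pvV ts r))).length = (ts.map (pvV ts r)).length := by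
      have := congrArg Int.toNat habs
      simpa [PySem.Set.len] using this
    have heq := List.Sublist.eq_of_length (pvOfList_sublist (ts.map (pvV ts r))) hlen
    have hnd2 : (ts.map (pvV ts r)).Nodup := by
      rw [← heq]
      exact PySem.Set.nodup_ofList _
    -- no duplicates among the current tuples forces every id settled
    intro t ht
    by_contra hu
    push_neg at hu
    have h2 := pvCollide_unsettled hnd ht hu
    have := (List.nodup_iff_count_le_one.mp hnd2) (pvV ts r t)
    omega

theorem pvS_settled {ts : List String} {r : Nat} (hall : ∀ t ∈ ts, pvK ts t ≤ r+1) :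
    pvS ts r = ts.map (fun t => (t, (pvP t).take (pvK ts t))) := by
  unfold pvS
  apply List.map_congr_left
  intro t ht
  rw [pvV_eq_take (hall t ht)]

theorem pvLoop_eq {ts : List String} {allp : PySem.Dict String (List String)}
    (hnd : ts.Nodup) (hD : ∀ t ∈ ts, allp.getD t [] = pvP t) :
    ∀ (fuel r : Nat), (∀ t ∈ ts, pvK ts t ≤ r + fuel) →
      pvLoopA allp (ts.length : Int) fuel (pvS ts r) =
        ts.map (fun t => (t, (pvP t).take (pvK ts t))) := by
  intro fuel
  induction fuel with
  | zero =>
    intro r hall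
    unfold pvLoopA
    exact pvS_settled (fun t ht => by have := hall t ht; omega)
  | succ n ih =>
    intro r hall
    unfold pvLoopA
    rw [pvS_snd, pvBreak_iff hnd]
    by_cases hset : ∀ t ∈ ts, pvK ts t ≤ r+1
    · rw [if_pos (by simp only [decide_eq_true_eq]; exact hset)]
      exact pvS_settled hset
    · rw [if_neg (by simp only [ne_eq, decide_eq_true_eq]; simpa using hset)]
      rw [pvStep_eq hnd hD]
      exact ih (r+1) (fun t ht => by have := hall t ht; omega)

def pvCanon (ts : List String) : List (String × String) :=
  ts.map (fun t => (t, PySem.Str.join "." ((pvP t).take (pvK ts t)).reverse))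

theorem pvItems_parts (ts : List String) (hnd : ts.Nodup) :
    (ts.foldl (fun d t => d.insert t ((PySem.Str.split? t ".").getD []).reverse) PySem.Dict.empty).items
      = ts.map (fun t => (t, pvP t)) := by
  have h := PySem.Dict.items_foldl_insert_fresh ts (fun t => t)
    (fun t => ((PySem.Str.split? t ".").getD []).reverse) PySem.Dict.empty
    (by intro a _; simp) (by simpa using hnd)
  simpa [pvP] using h

theorem pvA_eq (l : List String) :
    shorten_task_identifiers_py l = pvCanon (PySem.Set.ofList l) := by
  simp only [shorten_task_identifiers_py]
  set ts := PySem.Set.ofList l with hts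
  have hnd : ts.Nodup := PySem.Set.nodup_ofList l
  have hitems := pvItems_parts ts hnd
  rw [hitems]
  have hkeys : (ts.foldl (fun d t => d.insert t ((PySem.Str.split? t ".").getD []).reverse) PySem.Dict.empty).keys.Nodup := by
    simp only [PySem.Dict.keys, hitems, List.map_map]
    rw [show ((fun x => x.1) ∘ fun t : String => (t, pvP t)) = id from rfl, List.map_id]
    exact hnd
  have hD : ∀ t ∈ ts, (ts.foldl (fun d t => d.insert t ((PySem.Str.split? t ".").getD []).reverse) PySem.Dict.empty).getD t [] = pvP t := by
    intro t ht
    apply PySem.Dict.getD_of_mem_items _ _ hkeys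
    rw [hitems]
    exact List.mem_map.mpr ⟨t, ht, rfl⟩
  have hinit : (ts.map (fun t => (t, pvP t))).map (fun p => (p.1, [PySem.List.pyGetD p.2 (0 : Int) ""])) = pvS ts 0 := by
    rw [List.map_map]
    unfold pvS
    apply List.map_congr_left
    intro t ht
    simp only [Function.comp_apply]
    have hne := pvP_ne_nil t
    have hk := pvK_pos ts t
    have hv : pvV ts 0 t = (pvP t).take 1 := by
      unfold pvV
      rw [min_eq_left (by omega)]
    rw [hv]
    cases hp : pvP t with
    | nil => exact absurd hp hne
    | cons c cs => simp [PySem.List.pyGetD_zero_cons]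
  rw [hinit]
  have hfuel : ∀ t ∈ ts, pvK ts t ≤ 0 + (((ts.map (fun t => (t, pvP t))).map (fun p => p.2.length)).sum + 1) := by
    intro t ht
    have h1 := pvK_le ts t
    have h2 : (pvP t).length ≤ ((ts.map (fun t => (t, pvP t))).map (fun p => p.2.length)).sum := by
      apply List.le_sum_of_mem
      rw [List.map_map]
      exact List.mem_map.mpr ⟨t, ht, rfl⟩
    omega
  have hloop := pvLoop_eq (allp := (ts.foldl (fun d t => d.insert t ((PySem.Str.split? t ".").getD []).reverse) PySem.Dict.empty)) hnd hD _ 0 hfuel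
  have hlen : PySem.Set.len ts = (ts.length : Int) := rfl
  rw [hlen, hloop]
  have hout := PySem.Dict.items_foldl_insert_fresh
    (ts.map (fun t => (t, (pvP t).take (pvK ts t)))) (fun p => p.1)
    (fun p => PySem.Str.join "." p.2.reverse) PySem.Dict.empty
    (by intro a _; simp)
    (by
      rw [List.map_map]
      rw [show ((fun p : String × List String => p.1) ∘ fun t : String => (t, List.take (pvK ts t) (pvP t))) = id from rfl, List.map_id]
      exact hnd)
  rw [hout]
  unfold pvCanon
  rw [List.map_map]
  simp only [PySem.Dict.empty]
  rfl

def pvInnerKeys (p : List String) : List (List String) := (List.range p.length).map (fun j => p.take (j+1))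

theorem pvSlice_take (p : List String) (j : Nat) :
    PySem.List.slice p none (some ((1 : Int) + (j : Nat))) = p.take (j+1) := by
  rw [PySem.List.slice_to _ (by omega)]
  congr 1
  omega

theorem pvInner_fold (p : List String) (d : PySem.Dict (List String) Int) :
    (PySem.List.pyRange 1 ((p.length : Int) + 1) 1).foldl
        (fun d k => d.insert (PySem.List.slice p none (some k))
                      (d.getD (PySem.List.slice p none (some k)) 0 + 1)) d
      = (pvInnerKeys p).foldl (fun d x => d.insert x (d.getD x 0 + 1)) d := by
  rw [PySem.List.pyRange_one]
  have hn : ((p.length : Int) + 1 - 1).toNat = p.length := by omega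
  rw [hn, List.foldl_map]
  unfold pvInnerKeys
  rw [List.foldl_map]
  apply PySem.List.foldl_congr_mem
  intro acc j _
  rw [pvSlice_take]

theorem pvCounts_getD (L : List (List String)) :
    ∀ (d : PySem.Dict (List String) Int) (v : List String),
    (L.foldl (fun d p => (pvInnerKeys p).foldl (fun d x => d.insert x (d.getD x 0 + 1)) d) d).getD v 0
      = d.getD v 0 + ((L.flatMap pvInnerKeys).count v : Int) := by
  induction L with
  | nil => intro d v; simp
  | cons p L ih =>
    intro d v
    simp only [List.foldl_cons, List.flatMap_cons]
    rw [ih, PySem.Dict.getD_foldl_insert_add_one]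
    push_cast [List.count_append]
    ring

theorem pvInner_nodup (p : List String) : (pvInnerKeys p).Nodup := by
  unfold pvInnerKeys
  apply List.Nodup.map_on _ (List.nodup_range)
  intro x hx y hy hxy
  have := congrArg List.length hxy
  rw [List.length_take, List.length_take] at this
  simp only [List.mem_range] at hx hy
  omega

theorem pvInner_mem {p v : List String} (hv : 1 ≤ v.length) :
    v ∈ pvInnerKeys p ↔ p.take v.length = v := by
  unfold pvInnerKeys
  constructor
  · intro h
    obtain ⟨j, hj, rfl⟩ := List.mem_map.mp h
    simp only [List.mem_range] at hj
    rw [List.length_take, min_eq_left (by omega)]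
  · intro h
    have hlen : v.length ≤ p.length := by
      have := congrArg List.length h
      rw [List.length_take] at this
      omega
    apply List.mem_map.mpr
    refine ⟨v.length - 1, List.mem_range.mpr (by omega), ?_⟩
    rw [show v.length - 1 + 1 = v.length by omega]
    exact h

theorem pvInner_count {p v : List String} (hv : 1 ≤ v.length) :
    (pvInnerKeys p).count v = if p.take v.length = v then 1 else 0 := by
  by_cases h : p.take v.length = v
  · rw [if_pos h]
    exact List.count_eq_one_of_mem (pvInner_nodup p) ((pvInner_mem hv).mpr h)
  · rw [if_neg h]
    exact List.count_eq_zero_of_not_mem (fun hm => h ((pvInner_mem hv).mp hm))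

theorem pvSum_ite (ts : List String) (q : String → Bool) :
    (ts.map (fun t => if q t then 1 else 0)).sum = ts.countP q := by
  induction ts with
  | nil => simp
  | cons t ts ih =>
    simp only [List.map_cons, List.sum_cons, List.countP_cons, ih]
    by_cases h : q t <;> simp [h] <;> omega

theorem pvFlat_count {ts : List String} {t : String} {k : Nat} (hk1 : 1 ≤ k)
    (hkn : k ≤ (pvP t).length) :
    ((ts.map pvP).flatMap pvInnerKeys).count ((pvP t).take k) = pvCnt ts ((pvP t).take k) := by
  have hlen : ((pvP t).take k).length = k := by rw [List.length_take]; omega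
  rw [List.flatMap_def, List.count_flatten, List.map_map, List.map_map]
  simp only [Function.comp_def]
  have hmap : ∀ t' ∈ ts, List.count ((pvP t).take k) (pvInnerKeys (pvP t'))
      = if ((pvP t').take k == (pvP t).take k) = true then 1 else 0 := by
    intro t' _
    rw [pvInner_count (by omega), hlen]
    by_cases h : (pvP t').take k = (pvP t).take k <;> simp [h]
  rw [List.map_congr_left hmap, pvSum_ite]
  rw [pvCnt_take hkn]

theorem pvFind?_congr {α : Type} {p q : α → Bool} : ∀ {l : List α}, (∀ x ∈ l, p x = q x) →
    l.find? p = l.find? q := by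
  intro l
  induction l with
  | nil => intro _; rfl
  | cons x l ih =>
    intro h
    rw [List.find?_cons, List.find?_cons, h x List.mem_cons_self]
    cases q x with
    | true => rfl
    | false => exact ih (fun y hy => h y (List.mem_cons_of_mem x hy))

theorem pvCast_beq (c : Nat) : ((c : Int) == (1 : Int)) = (c == 1) := by
  by_cases h : c = 1 <;> simp [h]

theorem pvSelect {ts : List String} {C : PySem.Dict (List String) Int}
    (hC : ∀ v, C.getD v 0 = (((ts.map pvP).flatMap pvInnerKeys).count v : Int))
    (t : String) :
    PySem.List.slice (pvP t) none (some
      (((PySem.List.pyRange 1 (((pvP t).length : Int) + 1) 1).find?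
          (fun k => C.getD (PySem.List.slice (pvP t) none (some k)) 0 == 1)).getD ((pvP t).length : Int)))
      = (pvP t).take (pvK ts t) := by
  rw [PySem.List.pyRange_one]
  have hn : (((pvP t).length : Int) + 1 - 1).toNat = (pvP t).length := by omega
  rw [hn, List.find?_map]
  have hpred : ∀ j ∈ List.range (pvP t).length,
      ((fun k => C.getD (PySem.List.slice (pvP t) none (some k)) 0 == 1) ∘ (fun j : Nat => (1 : Int) + ↑j)) j
        = (fun j => pvCnt ts ((pvP t).take (j+1)) == 1) j := by
    intro j hj
    have hjn := List.mem_range.mp hj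
    simp only [Function.comp_apply]
    rw [pvSlice_take, hC, pvFlat_count (by omega) (by omega)]
    exact pvCast_beq _
  rw [pvFind?_congr hpred]
  cases hfind : (List.range (pvP t).length).find? (fun j => pvCnt ts ((pvP t).take (j+1)) == 1) with
  | some j =>
    simp only [Option.map_some, Option.getD_some]
    rw [pvSlice_take]
    unfold pvK
    rw [hfind]
    simp
  | none =>
    simp only [Option.map_none, Option.getD_none]
    rw [PySem.List.slice_to _ (by omega)]
    unfold pvK
    rw [hfind]
    simp

theorem pvB_eq (l : List String) :
    shorten_task_identifiers_py_alt l = pvCanon (PySem.Set.ofList l) := by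
  simp only [shorten_task_identifiers_py_alt]
  set ts := PySem.Set.ofList l with hts
  have hnd : ts.Nodup := PySem.Set.nodup_ofList l
  have hitems := pvItems_parts ts hnd
  simp only [PySem.Dict.values]
  rw [hitems]
  have hvals : (ts.map (fun t => (t, pvP t))).map (fun p => p.2) = ts.map pvP := by
    rw [List.map_map]; rfl
  rw [hvals]
  have hfoldfun : (fun (d : PySem.Dict (List String) Int) (p : List String) =>
      (PySem.List.pyRange 1 ((p.length : Int) + 1) 1).foldl
        (fun d k => d.insert (PySem.List.slice p none (some k))
                      (d.getD (PySem.List.slice p none (some k)) 0 + 1)) d)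
      = fun d p => (pvInnerKeys p).foldl (fun d x => d.insert x (d.getD x 0 + 1)) d := by
    funext d p
    exact pvInner_fold p d
  rw [hfoldfun]
  set C : PySem.Dict (List String) Int := (ts.map pvP).foldl (fun d p => (pvInnerKeys p).foldl (fun d x => d.insert x (d.getD x 0 + 1)) d) PySem.Dict.empty with hCdef
  have hC : ∀ (v : List String),
      C.getD v 0 = (((ts.map pvP).flatMap pvInnerKeys).count v : Int) := by
    intro v
    rw [hCdef, pvCounts_getD]
    simp
  have hout := PySem.Dict.items_foldl_insert_fresh
    (ts.map (fun t => (t, pvP t))) (fun q => q.1)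
    (fun q => PySem.Str.join "." (PySem.List.slice q.2 none (some
        (((PySem.List.pyRange 1 ((q.2.length : Int) + 1) 1).find?
            (fun k => C.getD (PySem.List.slice q.2 none (some k)) 0 == 1)).getD (q.2.length : Int)))).reverse)
    PySem.Dict.empty
    (by intro a _; simp)
    (by
      rw [List.map_map]
      rw [show ((fun q : String × List String => q.1) ∘ fun t : String => (t, pvP t)) = id from rfl, List.map_id]
      exact hnd)
  rw [hout]
  unfold pvCanon
  rw [List.map_map]
  simp only [PySem.Dict.empty, List.nil_append]
  apply List.map_congr_left
  intro t ht
  simp only [Function.comp_apply]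
  rw [pvSelect hC t]

-- ===== VERDICT (by name: the statement is the Claim_ definition above) =====
theorem shorten_task_identifiers_py_spec : Claim_equal_shorten_task_identifiers_py := by
  intro l _
  unfold Spec_shorten_task_identifiers_py
  rw [pvA_eq, pvB_eq]
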